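-- pv_equiv track=rewrite | github.com/pypi-data/pypi-mirror-98 | packages/nylib/nylib-1.0-py3-none-any.whl/collection_util.py | convert_dict_list_to_list_dict
-- ===== SOURCE A (Python) =====
-- def convert_dict_list_to_list_dict(list=[]):
--     dict = {}
--     if len(list) > 0:
--         dict = list[0]
--
--     def append_dict(dict={}, item={}):
--         keys = dict.keys()
--
--         for k in keys:
--             sublist = dict[k] if type(dict[k]).__name__ == 'list' else []
--
--             sublist.append(item.get(k, None))
--             dict[k] = sublist
--
--     for i, item in enumerate(list):
--         append_dict(dict, item)
--
--     return dict
-- ===== SOURCE B (Python) =====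
-- def convert_dict_list_to_list_dict(list=[]):
--     if not list:
--         return {}
--     return {k: [item.get(k) for item in list] for k in list[0]}
-- ===== Notes on version B (the rewrite author's own statement) =====
-- stated objective: simpler
-- what changed: A seeds a dict with the first record and mutates it record-by-record via a helper that per key re-wraps values into growing lists; B is a single key-oriented dict comprehension over the first record's keys, each column built in one pass over the list, with no mutation of list[0] and no helper.
import Mathlib
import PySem

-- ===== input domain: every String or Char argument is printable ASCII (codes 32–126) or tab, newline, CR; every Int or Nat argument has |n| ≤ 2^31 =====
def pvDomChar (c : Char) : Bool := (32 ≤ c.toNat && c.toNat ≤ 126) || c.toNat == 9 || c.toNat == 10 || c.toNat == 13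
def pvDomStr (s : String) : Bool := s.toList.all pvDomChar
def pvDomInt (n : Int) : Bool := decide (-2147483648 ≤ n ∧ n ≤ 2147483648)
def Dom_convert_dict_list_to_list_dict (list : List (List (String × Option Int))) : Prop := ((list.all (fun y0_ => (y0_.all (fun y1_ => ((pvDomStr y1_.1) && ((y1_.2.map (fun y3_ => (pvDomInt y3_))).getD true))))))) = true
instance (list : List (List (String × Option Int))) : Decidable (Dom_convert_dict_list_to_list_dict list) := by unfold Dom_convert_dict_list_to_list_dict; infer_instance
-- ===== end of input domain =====

-- B replaces A's record-by-record mutation of list[0] with one key-oriented dict comprehension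
-- (simpler, no helper). A mutates list[0] in place; B does not — the equivalence proved here is
-- about the RETURN value only.

-- ===== PORT A =====
-- During the loop A's dict holds either an original Option-Int value or a grown list: model with PyVal.
inductive PyVal where
  | opt : Option Int → PyVal
  | lst : List (Option Int) → PyVal
deriving DecidableEq, Repr

-- "dict[k] if type(dict[k]).__name__ == 'list' else []"
def pvAsList (v : PyVal) : List (Option Int) :=
  match v with
  | .lst l => l
  | .opt _ => []

-- the helper append_dict(dict, item): for k in dict.keys(): sublist = …; sublist.append(item.get(k, None)); dict[k] = sublist
-- (on the first iteration Python's item aliases the mutating dict itself, but for each key k the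
--  value dict[k] is read before it is reassigned, so reading the snapshot of list[0] is exact)
def pvAppendDict (d : PySem.Dict String PyVal) (item : PySem.Dict String (Option Int)) : PySem.Dict String PyVal :=
  d.keys.foldl
    (fun d' k =>
      let sublist := pvAsList (d'.getD k (.opt none))
      d'.insert k (.lst (sublist ++ [item.getD k none])))
    d

def convert_dict_list_to_list_dict (list : List (List (String × Option Int))) : List (String × List (Option Int)) :=
  -- dict = {}; if len(list) > 0: dict = list[0]
  let dict0 : PySem.Dict String PyVal :=
    if list.length > 0 then PySem.Dict.ofList ((list.headD []).map (fun p => (p.1, PyVal.opt p.2)))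
    else PySem.Dict.empty
  -- for i, item in enumerate(list): append_dict(dict, item)
  let dict := (PySem.List.enumerate list).foldl
    (fun d p => pvAppendDict d (PySem.Dict.ofList p.2)) dict0
  -- return dict  (its values are lists after the loop; PyVal.opt is unreachable here)
  dict.items.map (fun p => (p.1, pvAsList p.2))

-- ===== PORT B =====
def convert_dict_list_to_list_dict_alt (list : List (List (String × Option Int))) : List (String × List (Option Int)) :=
  match list with
  | [] => []
  | first :: _ =>
    (PySem.Dict.ofList first).keys.map
      (fun k => (k, list.map (fun item => (PySem.Dict.ofList item).getD k none)))

-- ===== PRECONDITION & SPEC =====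
def Spec_convert_dict_list_to_list_dict (list : List (List (String × Option Int))) (out : List (String × List (Option Int))) : Prop := out = convert_dict_list_to_list_dict_alt list
instance (list : List (List (String × Option Int))) (out : List (String × List (Option Int))) : Decidable (Spec_convert_dict_list_to_list_dict list out) := by unfold Spec_convert_dict_list_to_list_dict; infer_instance

-- ===== CLAIM (what is proved, stated in full; the proofs are below) =====
def Claim_equal_convert_dict_list_to_list_dict : Prop := ∀ (list : List (List (String × Option Int))), Dom_convert_dict_list_to_list_dict list → Spec_convert_dict_list_to_list_dict list (convert_dict_list_to_list_dict list)

-- ===== LEMMAS AND PROOFS =====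

-- keys are preserved by an insert-fold over keys already present
theorem pv_keys_fold_insert (f : PySem.Dict String PyVal → String → PyVal) :
    ∀ (L : List String) (d : PySem.Dict String PyVal), (∀ k ∈ L, k ∈ d.keys) →
      (L.foldl (fun d' k => d'.insert k (f d' k)) d).keys = d.keys := by
  intro L
  induction L with
  | nil => intro d _; rfl
  | cons a L ih =>
    intro d hmem
    have hc : d.contains a = true := (PySem.Dict.contains_iff_mem_keys _ _).2 (hmem a (by simp))
    have hk : (d.insert a (f d a)).keys = d.keys := PySem.Dict.keys_insert_of_contains d _ hc
    simp only [List.foldl_cons]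
    rw [ih (d.insert a (f d a)) (by intro k hkL; rw [hk]; exact hmem k (by simp [hkL])), hk]

-- value at k after append_dict's inner key loop
theorem pv_fold_getD (item : PySem.Dict String (Option Int)) :
    ∀ (L : List String), L.Nodup → ∀ (d d0 : PySem.Dict String PyVal),
      (∀ k ∈ L, d.getD k (PyVal.opt none) = d0.getD k (PyVal.opt none)) → ∀ k,
      (L.foldl (fun d' k => d'.insert k (PyVal.lst (pvAsList (d'.getD k (PyVal.opt none)) ++ [item.getD k none]))) d).getD k (PyVal.opt none)
        = if k ∈ L then PyVal.lst (pvAsList (d0.getD k (PyVal.opt none)) ++ [item.getD k none]) else d.getD k (PyVal.opt none) := by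
  intro L
  induction L with
  | nil => intro _ d d0 _ k; simp
  | cons a L ih =>
    intro hnd d d0 hagree k
    have hndL : L.Nodup := hnd.of_cons
    have haL : a ∉ L := by simp at hnd; exact hnd.1
    simp only [List.foldl_cons]
    rw [ih hndL _ d0 (by
      intro k' hk'
      rw [PySem.Dict.getD_insert]
      have : ¬ (k' = a) := fun h => haL (h ▸ hk')
      simp only [this, if_false]
      exact hagree k' (by simp [hk'])) k]
    by_cases hkL : k ∈ L
    · simp [hkL]
    · simp only [hkL, if_false]
      rw [PySem.Dict.getD_insert]
      by_cases hka : k = a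
      · subst hka
        simp only [List.mem_cons, true_or, if_true]
        rw [hagree k (by simp)]
      · simp [hka, hkL]

theorem pv_appendDict_keys (d : PySem.Dict String PyVal) (item : PySem.Dict String (Option Int)) :
    (pvAppendDict d item).keys = d.keys := by
  exact pv_keys_fold_insert (fun d' k => PyVal.lst (pvAsList (d'.getD k (PyVal.opt none)) ++ [item.getD k none]))
    d.keys d (fun k hk => hk)

theorem pv_appendDict_getD (d : PySem.Dict String PyVal) (item : PySem.Dict String (Option Int))
    (hnd : d.keys.Nodup) (k : String) :
    (pvAppendDict d item).getD k (PyVal.opt none)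
      = if k ∈ d.keys then PyVal.lst (pvAsList (d.getD k (PyVal.opt none)) ++ [item.getD k none])
        else d.getD k (PyVal.opt none) :=
  pv_fold_getD item d.keys hnd d d (fun _ _ => rfl) k

-- the outer record loop: keys are preserved …
theorem pv_loop_keys (its : List (List (String × Option Int))) :
    ∀ (d : PySem.Dict String PyVal),
      (its.foldl (fun dd it => pvAppendDict dd (PySem.Dict.ofList it)) d).keys = d.keys := by
  induction its with
  | nil => intro d; rfl
  | cons it its ih =>
    intro d
    simp only [List.foldl_cons]
    rw [ih, pv_appendDict_keys]

-- … and each present key accumulates one item.get(k, None) per record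
theorem pv_loop_getD (its : List (List (String × Option Int))) :
    ∀ (d : PySem.Dict String PyVal), d.keys.Nodup → ∀ k, k ∈ d.keys → its ≠ [] →
      (its.foldl (fun dd it => pvAppendDict dd (PySem.Dict.ofList it)) d).getD k (PyVal.opt none)
        = PyVal.lst (pvAsList (d.getD k (PyVal.opt none))
            ++ its.map (fun it => (PySem.Dict.ofList it).getD k none)) := by
  induction its with
  | nil => intro _ _ _ _ h; exact absurd rfl h
  | cons it its ih =>
    intro d hnd k hk _
    simp only [List.foldl_cons]
    have hkeys : (pvAppendDict d (PySem.Dict.ofList it)).keys = d.keys := pv_appendDict_keys _ _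
    have h1 : (pvAppendDict d (PySem.Dict.ofList it)).getD k (PyVal.opt none)
        = PyVal.lst (pvAsList (d.getD k (PyVal.opt none)) ++ [(PySem.Dict.ofList it).getD k none]) := by
      rw [pv_appendDict_getD d _ hnd k, if_pos hk]
    cases hits : its with
    | nil => subst hits; simp [h1]
    | cons it2 its2 =>
      subst hits
      rw [ih _ (hkeys ▸ hnd) k (hkeys ▸ hk) (by simp), h1]
      simp [pvAsList]

-- A's enumerate-fold ignores the index
theorem pv_enum_fold {α β : Type} (g : β → α → β) :
    ∀ (xs : List α) (s : Int) (d : β),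
      (PySem.List.enumerate xs s).foldl (fun d p => g d p.2) d = xs.foldl g d := by
  intro xs
  induction xs with
  | nil => intro s d; rfl
  | cons x xs ih => intro s d; rw [PySem.List.enumerate_cons]; simp only [List.foldl_cons]; exact ih _ _

-- building the dict from the opt-wrapped first record wraps every lookup and keeps the keys
theorem pv_update_map_opt (l : List (String × Option Int)) :
    ∀ (d : PySem.Dict String (Option Int)) (e : PySem.Dict String PyVal),
      (∀ k, e.get? k = (d.get? k).map PyVal.opt) → e.keys = d.keys →
      (∀ k, (e.update (l.map (fun p => (p.1, PyVal.opt p.2)))).get? k = ((d.update l).get? k).map PyVal.opt)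
        ∧ (e.update (l.map (fun p => (p.1, PyVal.opt p.2)))).keys = (d.update l).keys := by
  induction l with
  | nil => intro d e h1 h2; exact ⟨h1, h2⟩
  | cons p l ih =>
    intro d e h1 h2
    simp only [List.map_cons, PySem.Dict.update, List.foldl_cons]
    have hc : (e.insert p.1 (PyVal.opt p.2)).keys = (d.insert p.1 p.2).keys := by
      by_cases hcd : d.contains p.1 = true
      · have hce : e.contains p.1 = true := by
          rw [PySem.Dict.contains_eq_isSome_get?, h1, Option.isSome_map]
          rw [PySem.Dict.contains_eq_isSome_get?] at hcd; exact hcd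
        rw [PySem.Dict.keys_insert_of_contains d _ hcd, PySem.Dict.keys_insert_of_contains e _ hce, h2]
      · have hce : ¬ e.contains p.1 = true := by
          rw [PySem.Dict.contains_eq_isSome_get?, h1, Option.isSome_map]
          rw [PySem.Dict.contains_eq_isSome_get?] at hcd; exact hcd
        rw [PySem.Dict.keys_insert_of_not_contains d _ (by simpa using hcd),
          PySem.Dict.keys_insert_of_not_contains e _ (by simpa using hce), h2]
    exact ih (d.insert p.1 p.2) (e.insert p.1 (PyVal.opt p.2))
      (by intro k; rw [PySem.Dict.get?_insert, PySem.Dict.get?_insert]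
          by_cases hk : k = p.1 <;> simp [hk, h1]) hc

theorem pv_ofList_map_opt (l : List (String × Option Int)) :
    (∀ k, (PySem.Dict.ofList (l.map (fun p => (p.1, PyVal.opt p.2)))).get? k
        = ((PySem.Dict.ofList l).get? k).map PyVal.opt)
      ∧ (PySem.Dict.ofList (l.map (fun p => (p.1, PyVal.opt p.2)))).keys = (PySem.Dict.ofList l).keys :=
  pv_update_map_opt l PySem.Dict.empty PySem.Dict.empty (fun _ => rfl) rfl

-- ===== VERDICT (by name: the statement is the Claim_ definition above) =====
theorem convert_dict_list_to_list_dict_spec : Claim_equal_convert_dict_list_to_list_dict := by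
  intro list _
  unfold Spec_convert_dict_list_to_list_dict
  cases list with
  | nil => rfl
  | cons first rest =>
    unfold convert_dict_list_to_list_dict convert_dict_list_to_list_dict_alt
    simp only [List.length_cons, List.headD_cons, gt_iff_lt, if_pos, Nat.zero_lt_succ]
    rw [pv_enum_fold (fun d it => pvAppendDict d (PySem.Dict.ofList it)) (first :: rest) 0]
    set e : PySem.Dict String PyVal := PySem.Dict.ofList (first.map (fun p => (p.1, PyVal.opt p.2))) with he
    have hkeys : e.keys = (PySem.Dict.ofList first).keys := (pv_ofList_map_opt first).2
    have hnd : e.keys.Nodup := by rw [hkeys]; exact PySem.Dict.nodup_keys_ofList first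
    have hloopk : ((first :: rest).foldl (fun dd it => pvAppendDict dd (PySem.Dict.ofList it)) e).keys = e.keys :=
      pv_loop_keys _ e
    have hloopnd := hloopk ▸ hnd
    rw [PySem.Dict.items_eq_map_keys _ hloopnd (PyVal.opt none), hloopk, hkeys, List.map_map]
    apply List.map_congr_left
    intro k hk
    simp only [Function.comp]
    rw [pv_loop_getD (first :: rest) e hnd k (by rw [hkeys]; exact hk) (by simp)]
    have hasl : pvAsList (e.getD k (PyVal.opt none)) = [] := by
      rw [PySem.Dict.getD_eq_get?_getD, (pv_ofList_map_opt first).1 k]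
      cases (PySem.Dict.ofList first).get? k <;> rfl
    rw [hasl]
    rfl
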